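-- pv_equiv track=rewrite | github.com/mrpity/new-project | func.py | matchOctets
-- ===== SOURCE A (Python) =====
-- def matchOctets(newListIP, IParray):
--     matches_arr = dict()
--     for ip1 in newListIP:
--         matches = list()
--         for ip2 in IParray:
--             match = 0
--             for index, octet in enumerate(ip1.split('.')[:3]):
--                 if match == 0 and index > 0:
--                     break
--                 match += bool(octet == ip2.split('.')[index])
--             matches.append(match)
--         matches_arr.update({ip1: max(matches)})
--     return matches_arr
-- ===== SOURCE B (Python) =====
-- def matchOctets(newListIP, IParray):
--     # Index IParray once: first octets, (first,second) pairs, (first,third) pairs,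
--     # and (first,second,third) triples; then each IP is scored by O(1) set lookups.
--     firsts = set()
--     seconds = set()
--     thirds = set()
--     triples = set()
--     for ip2 in IParray:
--         ys = ip2.split('.')
--         firsts.add(ys[0])
--         if len(ys) > 1:
--             seconds.add((ys[0], ys[1]))
--         if len(ys) > 2:
--             thirds.add((ys[0], ys[2]))
--             triples.add((ys[0], ys[1], ys[2]))
--     matches_arr = dict()
--     for ip1 in newListIP:
--         xs = ip1.split('.')[:3]
--         if xs[0] not in firsts:
--             score = 0
--         elif len(xs) == 1:
--             score = 1
--         elif len(xs) == 2:
--             score = 2 if (xs[0], xs[1]) in seconds else 1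
--         elif (xs[0], xs[1], xs[2]) in triples:
--             score = 3
--         elif (xs[0], xs[1]) in seconds or (xs[0], xs[2]) in thirds:
--             score = 2
--         else:
--             score = 1
--         matches_arr[ip1] = score
--     return matches_arr
-- ===== Notes on version B (the rewrite author's own statement) =====
-- stated objective: faster
-- what changed: B indexes IParray once into hash sets of first octets, (first,second) and (first,third) pairs and (first,second,third) triples, then scores each IP with a constant number of set lookups instead of rescanning and re-splitting all of IParray for every IP.
import Mathlib
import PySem

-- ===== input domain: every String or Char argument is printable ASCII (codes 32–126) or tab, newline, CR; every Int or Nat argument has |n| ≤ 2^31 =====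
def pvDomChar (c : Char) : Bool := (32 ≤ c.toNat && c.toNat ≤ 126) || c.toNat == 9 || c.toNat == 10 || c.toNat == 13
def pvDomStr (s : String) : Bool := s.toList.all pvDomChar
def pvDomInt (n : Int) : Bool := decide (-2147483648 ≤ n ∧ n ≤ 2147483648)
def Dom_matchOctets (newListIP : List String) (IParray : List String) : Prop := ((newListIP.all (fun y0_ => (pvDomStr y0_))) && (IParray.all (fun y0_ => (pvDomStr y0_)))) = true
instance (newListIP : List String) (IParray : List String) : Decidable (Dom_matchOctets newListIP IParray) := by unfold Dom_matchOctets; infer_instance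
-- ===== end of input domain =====

-- B replaces A's per-IP rescan of IParray by a one-time index of IParray's octets in hash
-- sets, scoring each IP by a constant number of set lookups.

-- shared primitive: ip.split('.')  (sep "." ≠ "", so split? is always some)
def pvSplit (s : String) : List String := (PySem.Str.split? s ".").getD []

-- ===== PORT A =====
-- the inner 'for index, octet in enumerate(...)' loop with its break
def pvMatchLoop (ys : List String) : List (Int × String) → Int → Int
  | [], m => m
  | (i, octet) :: rest, m =>
    if m == 0 && decide (0 < i) then m
    else pvMatchLoop ys rest (m + (if octet == PySem.List.pyGetD ys i "" then 1 else 0))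
    -- pyGetD: Pre_ guarantees the index is in range wherever this line is reached

def pvAScore (ip1 ip2 : String) : Int :=
  pvMatchLoop (pvSplit ip2) (PySem.List.enumerate ((pvSplit ip1).take 3)) 0

def matchOctets (newListIP : List String) (IParray : List String) : List (String × Int) :=
  (newListIP.foldl (fun d ip1 =>
      let matchesL := IParray.foldl (fun acc ip2 => acc ++ [pvAScore ip1 ip2]) []
      d.insert ip1 ((PySem.List.max? matchesL (fun v => v)).getD 0)) PySem.Dict.empty).items
  -- max(matchesL): none only when IParray = [], which Pre_ excludes for nonempty newListIP

-- ===== PORT B =====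
-- one pass over IParray: sets of first octets, (first,second), (first,third), (first,second,third)
def pvIndexF (st : PySem.Set String × PySem.Set (String × String) × PySem.Set (String × String) ×
    PySem.Set (String × String × String)) (ip2 : String) :
    PySem.Set String × PySem.Set (String × String) × PySem.Set (String × String) ×
      PySem.Set (String × String × String) :=
  let ys := pvSplit ip2
  let y0 := PySem.List.pyGetD ys 0 ""
  (PySem.Set.add st.1 y0,
   if 1 < ys.length then PySem.Set.add st.2.1 (y0, PySem.List.pyGetD ys 1 "") else st.2.1,
   if 2 < ys.length then PySem.Set.add st.2.2.1 (y0, PySem.List.pyGetD ys 2 "") else st.2.2.1,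
   if 2 < ys.length then
     PySem.Set.add st.2.2.2 (y0, PySem.List.pyGetD ys 1 "", PySem.List.pyGetD ys 2 "")
   else st.2.2.2)

def pvIndex (IParray : List String) :
    PySem.Set String × PySem.Set (String × String) × PySem.Set (String × String) ×
      PySem.Set (String × String × String) :=
  IParray.foldl pvIndexF (PySem.Set.empty, PySem.Set.empty, PySem.Set.empty, PySem.Set.empty)

def pvBScore
    (idx : PySem.Set String × PySem.Set (String × String) × PySem.Set (String × String) ×
      PySem.Set (String × String × String)) (ip1 : String) : Int :=
  let xs := (pvSplit ip1).take 3
  let x0 := PySem.List.pyGetD xs 0 ""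
  if !(PySem.Set.contains idx.1 x0) then 0
  else if xs.length == 1 then 1
  else if xs.length == 2 then
    (if PySem.Set.contains idx.2.1 (x0, PySem.List.pyGetD xs 1 "") then 2 else 1)
  else if PySem.Set.contains idx.2.2.2
      (x0, PySem.List.pyGetD xs 1 "", PySem.List.pyGetD xs 2 "") then 3
  else if PySem.Set.contains idx.2.1 (x0, PySem.List.pyGetD xs 1 "")
      || PySem.Set.contains idx.2.2.1 (x0, PySem.List.pyGetD xs 2 "") then 2
  else 1

def matchOctets_alt (newListIP : List String) (IParray : List String) : List (String × Int) :=
  let idx := pvIndex IParray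
  (newListIP.foldl (fun d ip1 => d.insert ip1 (pvBScore idx ip1)) PySem.Dict.empty).items

-- ===== PRECONDITION & SPEC =====
-- Pre_ excludes exactly the inputs where A raises: max([]) (ValueError) when IParray is empty
-- and newListIP is not, and ip2.split('.')[index] (IndexError) when some ip2 shares its first
-- octet with some ip1 but has fewer octets than ip1's (up to 3) octets.
def Pre_matchOctets (newListIP : List String) (IParray : List String) : Prop :=
  newListIP ≠ [] →
    (IParray ≠ [] ∧ ∀ ip1 ∈ newListIP, ∀ ip2 ∈ IParray,
      PySem.List.pyGetD (pvSplit ip1) 0 "" = PySem.List.pyGetD (pvSplit ip2) 0 "" →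
      ((pvSplit ip1).take 3).length ≤ (pvSplit ip2).length)
instance (newListIP : List String) (IParray : List String) : Decidable (Pre_matchOctets newListIP IParray) := by unfold Pre_matchOctets; infer_instance
def pvWitness_matchOctets : List String × List String := (["1.2.3", "9"], ["1.2.4", "8.1"])

def Spec_matchOctets (newListIP : List String) (IParray : List String) (out : List (String × Int)) : Prop := out = matchOctets_alt newListIP IParray
instance (newListIP : List String) (IParray : List String) (out : List (String × Int)) : Decidable (Spec_matchOctets newListIP IParray out) := by unfold Spec_matchOctets; infer_instance

-- ===== CLAIM (what is proved, stated in full; the proofs are below) =====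
def Claim_equal_matchOctets : Prop := ∀ (newListIP : List String) (IParray : List String), Dom_matchOctets newListIP IParray → Pre_matchOctets newListIP IParray → Spec_matchOctets newListIP IParray (matchOctets newListIP IParray)

-- ===== LEMMAS AND PROOFS =====

-- Boolean descriptions of the four index sets
def pvSF (l : List String) (v : String) : Bool :=
  l.any (fun ip2 => PySem.List.pyGetD (pvSplit ip2) 0 "" == v)
def pvSS (l : List String) (v w : String) : Bool :=
  l.any (fun ip2 => decide (1 < (pvSplit ip2).length) &&
    (PySem.List.pyGetD (pvSplit ip2) 0 "" == v) && (PySem.List.pyGetD (pvSplit ip2) 1 "" == w))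
def pvST (l : List String) (v u : String) : Bool :=
  l.any (fun ip2 => decide (2 < (pvSplit ip2).length) &&
    (PySem.List.pyGetD (pvSplit ip2) 0 "" == v) && (PySem.List.pyGetD (pvSplit ip2) 2 "" == u))
def pvSR (l : List String) (v w u : String) : Bool :=
  l.any (fun ip2 => decide (2 < (pvSplit ip2).length) &&
    (PySem.List.pyGetD (pvSplit ip2) 0 "" == v) && (PySem.List.pyGetD (pvSplit ip2) 1 "" == w) &&
    (PySem.List.pyGetD (pvSplit ip2) 2 "" == u))

-- the reference score at an (already truncated) octet list xs, via the Boolean predicates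
def pvGX (l : List String) (xs : List String) : Int :=
  let x0 := PySem.List.pyGetD xs 0 ""
  if !pvSF l x0 then 0
  else if xs.length == 1 then 1
  else if xs.length == 2 then
    (if pvSS l x0 (PySem.List.pyGetD xs 1 "") then 2 else 1)
  else if pvSR l x0 (PySem.List.pyGetD xs 1 "") (PySem.List.pyGetD xs 2 "") then 3
  else if pvSS l x0 (PySem.List.pyGetD xs 1 "") || pvST l x0 (PySem.List.pyGetD xs 2 "") then 2
  else 1

lemma pvSF_cons (y : String) (t : List String) (v : String) :
    pvSF (y :: t) v = ((PySem.List.pyGetD (pvSplit y) 0 "" == v) || pvSF t v) := by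
  simp [pvSF]
lemma pvSS_cons (y : String) (t : List String) (v w : String) :
    pvSS (y :: t) v w = ((decide (1 < (pvSplit y).length) &&
      (PySem.List.pyGetD (pvSplit y) 0 "" == v) && (PySem.List.pyGetD (pvSplit y) 1 "" == w))
      || pvSS t v w) := by
  simp [pvSS]
lemma pvST_cons (y : String) (t : List String) (v u : String) :
    pvST (y :: t) v u = ((decide (2 < (pvSplit y).length) &&
      (PySem.List.pyGetD (pvSplit y) 0 "" == v) && (PySem.List.pyGetD (pvSplit y) 2 "" == u))
      || pvST t v u) := by
  simp [pvST]
lemma pvSR_cons (y : String) (t : List String) (v w u : String) :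
    pvSR (y :: t) v w u = ((decide (2 < (pvSplit y).length) &&
      (PySem.List.pyGetD (pvSplit y) 0 "" == v) && (PySem.List.pyGetD (pvSplit y) 1 "" == w) &&
      (PySem.List.pyGetD (pvSplit y) 2 "" == u)) || pvSR t v w u) := by
  simp [pvSR]

lemma loop1 (ys : List String) (a : String) :
    pvMatchLoop ys (PySem.List.enumerate [a]) 0
      = if a = PySem.List.pyGetD ys 0 "" then 1 else 0 := by
  by_cases h : a = PySem.List.pyGetD ys 0 "" <;>
    simp [PySem.List.enumerate, pvMatchLoop, h]
lemma loop2 (ys : List String) (a b : String) :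
    pvMatchLoop ys (PySem.List.enumerate [a, b]) 0
      = if a = PySem.List.pyGetD ys 0 "" then
          1 + (if b = PySem.List.pyGetD ys 1 "" then 1 else 0) else 0 := by
  by_cases h : a = PySem.List.pyGetD ys 0 "" <;>
    by_cases h2 : b = PySem.List.pyGetD ys 1 "" <;>
    simp [PySem.List.enumerate, pvMatchLoop, h, h2]
lemma loop3 (ys : List String) (a b c : String) :
    pvMatchLoop ys (PySem.List.enumerate [a, b, c]) 0
      = if a = PySem.List.pyGetD ys 0 "" then
          1 + (if b = PySem.List.pyGetD ys 1 "" then 1 else 0)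
            + (if c = PySem.List.pyGetD ys 2 "" then 1 else 0) else 0 := by
  by_cases h : a = PySem.List.pyGetD ys 0 "" <;>
    by_cases h2 : b = PySem.List.pyGetD ys 1 "" <;>
    by_cases h3 : c = PySem.List.pyGetD ys 2 "" <;>
    simp [PySem.List.enumerate, pvMatchLoop, h, h2, h3]

lemma pvSS_imp_pvSF (t : List String) (v w : String) (h : pvSS t v w = true) :
    pvSF t v = true := by
  simp only [pvSS, pvSF, List.any_eq_true, Bool.and_eq_true, beq_iff_eq,
    decide_eq_true_eq] at *
  obtain ⟨x, hx, hc⟩ := h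
  exact ⟨x, hx, hc.1.2⟩
lemma pvST_imp_pvSF (t : List String) (v u : String) (h : pvST t v u = true) :
    pvSF t v = true := by
  simp only [pvST, pvSF, List.any_eq_true, Bool.and_eq_true, beq_iff_eq,
    decide_eq_true_eq] at *
  obtain ⟨x, hx, hc⟩ := h
  exact ⟨x, hx, hc.1.2⟩
lemma pvSR_imp_pvSS (t : List String) (v w u : String) (h : pvSR t v w u = true) :
    pvSS t v w = true := by
  simp only [pvSR, pvSS, List.any_eq_true, Bool.and_eq_true, beq_iff_eq,
    decide_eq_true_eq] at *
  obtain ⟨x, hx, hc⟩ := h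
  have hl : 2 < (pvSplit x).length := hc.1.1.1
  exact ⟨x, hx, ⟨by omega, hc.1.1.2⟩, hc.1.2⟩
lemma pvSR_imp_pvST (t : List String) (v w u : String) (h : pvSR t v w u = true) :
    pvST t v u = true := by
  simp only [pvSR, pvST, List.any_eq_true, Bool.and_eq_true, beq_iff_eq,
    decide_eq_true_eq] at *
  obtain ⟨x, hx, hc⟩ := h
  exact ⟨x, hx, ⟨hc.1.1.1, hc.1.1.2⟩, hc.2⟩

lemma pvGX1 (l : List String) (a : String) :
    pvGX l [a] = if pvSF l a then 1 else 0 := by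
  cases h : pvSF l a <;> simp [pvGX, pysem, h]
lemma pvGX2 (l : List String) (a b : String) :
    pvGX l [a, b] = if pvSF l a then (if pvSS l a b then 2 else 1) else 0 := by
  cases h : pvSF l a <;> simp [pvGX, pysem, h]
lemma pvGX3 (l : List String) (a b c : String) :
    pvGX l [a, b, c] = if pvSF l a then
      (if pvSR l a b c then 3 else if pvSS l a b || pvST l a c then 2 else 1) else 0 := by
  cases h : pvSF l a <;> simp [pvGX, pysem, h]

set_option maxHeartbeats 2000000 in
lemma pvStepX (xs : List String) (y : String) (t : List String)
    (hshape : xs.length = 1 ∨ xs.length = 2 ∨ xs.length = 3)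
    (hrow : PySem.List.pyGetD xs 0 "" = PySem.List.pyGetD (pvSplit y) 0 "" →
      xs.length ≤ (pvSplit y).length) :
    max (pvMatchLoop (pvSplit y) (PySem.List.enumerate xs) 0) (pvGX t xs)
      = pvGX (y :: t) xs := by
  match xs, hshape with
  | [a], _ =>
    rw [loop1, pvGX1, pvGX1, pvSF_cons]
    by_cases h0 : a = PySem.List.pyGetD (pvSplit y) 0 ""
    · have e0 : (PySem.List.pyGetD (pvSplit y) 0 "" == a) = true := by
        simp [beq_iff_eq, h0]
      by_cases hf : pvSF t a <;> simp_all <;> decide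
    · have e0 : (PySem.List.pyGetD (pvSplit y) 0 "" == a) = false := by
        simp [beq_iff_eq]; exact fun e => h0 e.symm
      by_cases hf : pvSF t a <;> simp_all <;> decide
  | [a, b], _ =>
    rw [loop2, pvGX2, pvGX2, pvSF_cons, pvSS_cons]
    have mono1 := pvSS_imp_pvSF t a b
    by_cases h0 : a = PySem.List.pyGetD (pvSplit y) 0 ""
    · have hlen : 2 ≤ (pvSplit y).length := by
        have := hrow (by simp [pysem, h0]); simpa using this
      have e0 : (PySem.List.pyGetD (pvSplit y) 0 "" == a) = true := by
        simp [beq_iff_eq, h0]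
      have dd1 : decide (1 < (pvSplit y).length) = true := decide_eq_true (by omega)
      by_cases h1 : b = PySem.List.pyGetD (pvSplit y) 1 ""
      · have e1 : (PySem.List.pyGetD (pvSplit y) 1 "" == b) = true := by
          simp [beq_iff_eq, h1]
        by_cases hf : pvSF t a <;> by_cases hs : pvSS t a b <;> simp_all <;> decide
      · have e1 : (PySem.List.pyGetD (pvSplit y) 1 "" == b) = false := by
          simp [beq_iff_eq]; exact fun e => h1 e.symm
        by_cases hf : pvSF t a <;> by_cases hs : pvSS t a b <;> simp_all <;> decide
    · have e0 : (PySem.List.pyGetD (pvSplit y) 0 "" == a) = false := by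
        simp [beq_iff_eq]; exact fun e => h0 e.symm
      by_cases hf : pvSF t a <;> by_cases hs : pvSS t a b <;> simp_all <;> decide
  | [a, b, c], _ =>
    rw [loop3, pvGX3, pvGX3, pvSF_cons, pvSS_cons, pvST_cons, pvSR_cons]
    have mono1 := pvSS_imp_pvSF t a b
    have mono2 := pvST_imp_pvSF t a c
    have mono3 := pvSR_imp_pvSS t a b c
    have mono4 := pvSR_imp_pvST t a b c
    by_cases h0 : a = PySem.List.pyGetD (pvSplit y) 0 ""
    · have hlen : 3 ≤ (pvSplit y).length := by
        have := hrow (by simp [pysem, h0]); simpa using this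
      have e0 : (PySem.List.pyGetD (pvSplit y) 0 "" == a) = true := by
        simp [beq_iff_eq, h0]
      have dd1 : decide (1 < (pvSplit y).length) = true := decide_eq_true (by omega)
      have dd2 : decide (2 < (pvSplit y).length) = true := decide_eq_true (by omega)
      by_cases h1 : b = PySem.List.pyGetD (pvSplit y) 1 ""
      · have e1 : (PySem.List.pyGetD (pvSplit y) 1 "" == b) = true := by
          simp [beq_iff_eq, h1]
        by_cases h2 : c = PySem.List.pyGetD (pvSplit y) 2 ""
        · have e2 : (PySem.List.pyGetD (pvSplit y) 2 "" == c) = true := by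
            simp [beq_iff_eq, h2]
          by_cases hf : pvSF t a <;> by_cases hs : pvSS t a b <;>
            by_cases ht : pvST t a c <;> by_cases hr : pvSR t a b c <;>
            simp_all <;> decide
        · have e2 : (PySem.List.pyGetD (pvSplit y) 2 "" == c) = false := by
            simp [beq_iff_eq]; exact fun e => h2 e.symm
          by_cases hf : pvSF t a <;> by_cases hs : pvSS t a b <;>
            by_cases ht : pvST t a c <;> by_cases hr : pvSR t a b c <;>
            simp_all <;> decide
      · have e1 : (PySem.List.pyGetD (pvSplit y) 1 "" == b) = false := by
          simp [beq_iff_eq]; exact fun e => h1 e.symm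
        by_cases h2 : c = PySem.List.pyGetD (pvSplit y) 2 ""
        · have e2 : (PySem.List.pyGetD (pvSplit y) 2 "" == c) = true := by
            simp [beq_iff_eq, h2]
          by_cases hf : pvSF t a <;> by_cases hs : pvSS t a b <;>
            by_cases ht : pvST t a c <;> by_cases hr : pvSR t a b c <;>
            simp_all <;> decide
        · have e2 : (PySem.List.pyGetD (pvSplit y) 2 "" == c) = false := by
            simp [beq_iff_eq]; exact fun e => h2 e.symm
          by_cases hf : pvSF t a <;> by_cases hs : pvSS t a b <;>
            by_cases ht : pvST t a c <;> by_cases hr : pvSR t a b c <;>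
            simp_all <;> decide
    · have e0 : (PySem.List.pyGetD (pvSplit y) 0 "" == a) = false := by
        simp [beq_iff_eq]; exact fun e => h0 e.symm
      by_cases hf : pvSF t a <;> by_cases hs : pvSS t a b <;>
        by_cases ht : pvST t a c <;> by_cases hr : pvSR t a b c <;>
        simp_all <;> decide

lemma pvGX_nonneg (l : List String) (xs : List String) : 0 ≤ pvGX l xs := by
  simp only [pvGX]
  split_ifs <;> omega

lemma pvSplitGo_ne_nil (sep : List Char) :
    ∀ (fuel : Nat) (l cur : List Char) (acc : List (List Char)),
      PySem.Chars.splitOn.go sep fuel l cur acc ≠ [] := by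
  intro fuel
  induction fuel with
  | zero => intro l cur acc; simp [PySem.Chars.splitOn.go]
  | succ n ih =>
    intro l cur acc
    cases l with
    | nil => simp [PySem.Chars.splitOn.go]
    | cons c rest =>
      rw [PySem.Chars.splitOn.go]
      split
      · exact ih _ _ _
      · exact ih _ _ _

lemma pvSplit_ne_nil (s : String) : pvSplit s ≠ [] := by
  simp [pvSplit, PySem.Str.split?, PySem.Chars.split?, PySem.Chars.splitOn]
  intro h
  exact pvSplitGo_ne_nil _ _ _ _ _ h

lemma pvTake3_shape (s : String) :
    ((pvSplit s).take 3).length = 1 ∨ ((pvSplit s).take 3).length = 2 ∨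
      ((pvSplit s).take 3).length = 3 := by
  have h := pvSplit_ne_nil s
  have : 1 ≤ (pvSplit s).length := by
    cases hs : pvSplit s with
    | nil => exact absurd hs h
    | cons _ _ => simp
  simp [List.length_take]
  omega

lemma pvHead_take (s : String) :
    PySem.List.pyGetD ((pvSplit s).take 3) 0 "" = PySem.List.pyGetD (pvSplit s) 0 "" := by
  cases hs : pvSplit s with
  | nil => exact absurd hs (pvSplit_ne_nil s)
  | cons x xs => simp [pysem]

def pvRowOk (ip1 ip2 : String) : Prop :=
  PySem.List.pyGetD (pvSplit ip1) 0 "" = PySem.List.pyGetD (pvSplit ip2) 0 "" →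
    ((pvSplit ip1).take 3).length ≤ (pvSplit ip2).length

lemma pvKey (ip1 : String) :
    ∀ (l : List String), (∀ ip2 ∈ l, pvRowOk ip1 ip2) → ∀ a : Int, 0 ≤ a →
      l.foldl (fun acc ip2 => max acc (pvAScore ip1 ip2)) a
        = max a (pvGX l ((pvSplit ip1).take 3)) := by
  intro l
  induction l with
  | nil =>
    intro _ a ha
    simp only [List.foldl_nil]
    have : pvGX [] ((pvSplit ip1).take 3) = 0 := by simp [pvGX, pvSF]
    rw [this]
    omega
  | cons y t ih =>
    intro hrows a ha
    rw [List.foldl_cons]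
    have hnn : (0 : Int) ≤ max a (pvAScore ip1 y) := le_trans ha (le_max_left _ _)
    rw [ih (fun z hz => hrows z (List.mem_cons_of_mem _ hz)) _ hnn]
    rw [max_assoc]
    congr 1
    have hrow := hrows y (List.mem_cons_self)
    have hrow' : PySem.List.pyGetD ((pvSplit ip1).take 3) 0 ""
        = PySem.List.pyGetD (pvSplit y) 0 "" →
        ((pvSplit ip1).take 3).length ≤ (pvSplit y).length := by
      intro h; exact hrow ((pvHead_take ip1) ▸ h)
    exact pvStepX ((pvSplit ip1).take 3) y t (pvTake3_shape ip1) hrow'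

lemma pvMatchLoop_nonneg (ys : List String) :
    ∀ (ps : List (Int × String)) (m : Int), 0 ≤ m → 0 ≤ pvMatchLoop ys ps m := by
  intro ps
  induction ps with
  | nil => intro m hm; simpa [pvMatchLoop] using hm
  | cons p rest ih =>
    intro m hm
    obtain ⟨i, octet⟩ := p
    rw [pvMatchLoop]
    split
    · exact hm
    · exact ih _ (by split_ifs <;> omega)

lemma pvAScore_nonneg (ip1 ip2 : String) : 0 ≤ pvAScore ip1 ip2 :=
  pvMatchLoop_nonneg _ _ _ le_rfl

lemma pvAVal_eq (ip1 : String) (l : List String) (hl : l ≠ [])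
    (hrows : ∀ ip2 ∈ l, pvRowOk ip1 ip2) :
    (PySem.List.max? (l.foldl (fun acc ip2 => acc ++ [pvAScore ip1 ip2]) []) (fun v => v)).getD 0
      = pvGX l ((pvSplit ip1).take 3) := by
  rw [PySem.List.foldl_append_singleton_eq_map]
  cases l with
  | nil => exact absurd rfl hl
  | cons y t =>
    rw [List.nil_append, List.map_cons, PySem.List.max?_id_cons, Option.getD_some,
      List.foldl_map]
    have h0 := pvKey ip1 (y :: t) hrows 0 le_rfl
    rw [List.foldl_cons] at h0
    have hy : max (0 : Int) (pvAScore ip1 y) = pvAScore ip1 y :=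
      max_eq_right (pvAScore_nonneg ip1 y)
    rw [hy] at h0
    rw [h0]
    exact max_eq_right (pvGX_nonneg _ _)

lemma contains_condAdd {α : Type} [BEq α] [LawfulBEq α] (c : Prop) [Decidable c]
    (s : PySem.Set α) (x v : α) :
    PySem.Set.contains (if c then PySem.Set.add s x else s) v
      = (PySem.Set.contains s v || (decide c && v == x)) := by
  split <;> rw [Bool.eq_iff_iff] <;>
    simp_all [PySem.Set.contains_iff, PySem.Set.mem_add]

lemma pvIndexGo1 (l : List String) : ∀ st v,
    PySem.Set.contains (l.foldl pvIndexF st).1 v = (PySem.Set.contains st.1 v || pvSF l v) := by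
  induction l with
  | nil => simp [pvSF]
  | cons h t ih =>
    intro st v
    rw [List.foldl_cons, ih]
    have : PySem.Set.contains (pvIndexF st h).1 v
        = (PySem.Set.contains st.1 v || (PySem.List.pyGetD (pvSplit h) 0 "" == v)) := by
      simp only [pvIndexF]
      rw [Bool.eq_iff_iff]
      simp only [Bool.or_eq_true, PySem.Set.contains_iff, PySem.Set.mem_add, beq_iff_eq]
      tauto
    rw [this]
    simp only [pvSF, List.any_cons]
    rw [Bool.or_assoc]

lemma pvIndexGo2 (l : List String) : ∀ st v w,
    PySem.Set.contains (l.foldl pvIndexF st).2.1 (v, w)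
      = (PySem.Set.contains st.2.1 (v, w) || pvSS l v w) := by
  induction l with
  | nil => simp [pvSS]
  | cons h t ih =>
    intro st v w
    rw [List.foldl_cons, ih]
    simp only [pvIndexF]
    rw [contains_condAdd]
    rw [Bool.eq_iff_iff]
    simp only [pvSS, List.any_cons, Bool.or_eq_true, Bool.and_eq_true, beq_iff_eq,
      Prod.mk.injEq, decide_eq_true_eq]
    tauto

lemma pvIndexGo3 (l : List String) : ∀ st v u,
    PySem.Set.contains (l.foldl pvIndexF st).2.2.1 (v, u)
      = (PySem.Set.contains st.2.2.1 (v, u) || pvST l v u) := by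
  induction l with
  | nil => simp [pvST]
  | cons h t ih =>
    intro st v u
    rw [List.foldl_cons, ih]
    simp only [pvIndexF]
    rw [contains_condAdd]
    rw [Bool.eq_iff_iff]
    simp only [pvST, List.any_cons, Bool.or_eq_true, Bool.and_eq_true, beq_iff_eq,
      Prod.mk.injEq, decide_eq_true_eq]
    tauto

lemma pvIndexGo4 (l : List String) : ∀ st v w u,
    PySem.Set.contains (l.foldl pvIndexF st).2.2.2 (v, w, u)
      = (PySem.Set.contains st.2.2.2 (v, w, u) || pvSR l v w u) := by
  induction l with
  | nil => simp [pvSR]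
  | cons h t ih =>
    intro st v w u
    rw [List.foldl_cons, ih]
    simp only [pvIndexF]
    rw [contains_condAdd]
    rw [Bool.eq_iff_iff]
    simp only [pvSR, List.any_cons, Bool.or_eq_true, Bool.and_eq_true, beq_iff_eq,
      Prod.mk.injEq, decide_eq_true_eq]
    tauto

lemma pvIndex1 (l : List String) (v : String) :
    PySem.Set.contains (pvIndex l).1 v = pvSF l v := by
  rw [pvIndex, pvIndexGo1]
  simp [PySem.Set.empty]
lemma pvIndex2 (l : List String) (v w : String) :
    PySem.Set.contains (pvIndex l).2.1 (v, w) = pvSS l v w := by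
  rw [pvIndex, pvIndexGo2]
  simp [PySem.Set.empty]
lemma pvIndex3 (l : List String) (v u : String) :
    PySem.Set.contains (pvIndex l).2.2.1 (v, u) = pvST l v u := by
  rw [pvIndex, pvIndexGo3]
  simp [PySem.Set.empty]
lemma pvIndex4 (l : List String) (v w u : String) :
    PySem.Set.contains (pvIndex l).2.2.2 (v, w, u) = pvSR l v w u := by
  rw [pvIndex, pvIndexGo4]
  simp [PySem.Set.empty]

lemma pvBScore_eq_pvGX (l : List String) (ip1 : String) :
    pvBScore (pvIndex l) ip1 = pvGX l ((pvSplit ip1).take 3) := by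
  simp only [pvBScore, pvGX, pvIndex1, pvIndex2, pvIndex3, pvIndex4]

-- ===== VERDICT (by name: the statement is the Claim_ definition above) =====
theorem matchOctets_spec : Claim_equal_matchOctets := by
  intro newListIP IParray hdom hpre
  unfold Spec_matchOctets matchOctets matchOctets_alt
  cases newListIP with
  | nil => rfl
  | cons x xs =>
    obtain ⟨harr, hrows⟩ := hpre (by simp)
    refine congrArg PySem.Dict.items ?_
    refine PySem.List.foldl_congr_mem _ _ _ _ ?_
    intro acc ip1 hip1
    simp only
    rw [pvAVal_eq ip1 IParray harr (fun ip2 h2 => hrows ip1 hip1 ip2 h2),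
      ← pvBScore_eq_pvGX]
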